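-- pv_equiv track=rewrite | github.com/majewski-jacek/Sololearn_Code_Coach-edabit_challenges | edabit challenges/Snake_Arena_Filling.py | snakefill
-- ===== SOURCE A (Python) =====
-- def snakefill(n):
--     space = n * n
--     count = 0
--
--     while True:
--         snake = 2** count
--         if snake == space:
--             return count
--
--         elif snake > space:
--             return count - 1
--
--         else:
--             count += 1
-- ===== SOURCE B (Python) =====
-- def snakefill(n):
--     return (n * n).bit_length() - 1
-- ===== Notes on version B (the rewrite author's own statement) =====
-- stated objective: idiomatic
-- what changed: Replaces the double-until-exceed loop with a single closed-form bit_length computation of floor(log2(n*n)).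
import Mathlib
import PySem

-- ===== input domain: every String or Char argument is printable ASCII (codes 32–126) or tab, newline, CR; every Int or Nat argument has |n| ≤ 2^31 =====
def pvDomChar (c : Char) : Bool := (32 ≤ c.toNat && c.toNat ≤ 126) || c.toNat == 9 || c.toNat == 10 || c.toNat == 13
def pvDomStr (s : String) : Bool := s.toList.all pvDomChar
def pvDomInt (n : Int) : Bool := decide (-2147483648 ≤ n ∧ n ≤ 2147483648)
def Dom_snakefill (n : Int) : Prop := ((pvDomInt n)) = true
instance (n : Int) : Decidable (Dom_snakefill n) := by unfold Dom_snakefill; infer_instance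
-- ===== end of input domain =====

-- B replaces A's double-until-exceed loop by the closed form bit_length(n*n) - 1 (idiomatic, no loop).

-- ===== PORT A =====
-- the 'while True' loop of A: count starts at 0; terminates because 2^count strictly grows
def snakefillLoop (space : Int) (count : Nat) : Int :=
  let snake : Int := 2 ^ count
  if snake = space then (count : Int)
  else if snake > space then (count : Int) - 1
  else snakefillLoop space (count + 1)
termination_by space.toNat + 1 - 2 ^ count
decreasing_by
  rename_i h1 h2
  have hlt : (2 : Int) ^ count < space := lt_of_le_of_ne (not_lt.mp h2) h1
  have h2n : ((2 ^ count : Nat) : Int) = (2 : Int) ^ count := by push_cast; ring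
  have : (2 ^ count : Nat) < space.toNat := by
    have hs : (0 : Int) ≤ space := le_of_lt (lt_of_le_of_lt (by positivity) hlt)
    omega
  have : (2 ^ count : Nat) < 2 ^ (count + 1) := by
    have := Nat.one_le_two_pow (n := count); omega
  omega

def snakefill (n : Int) : Int := snakefillLoop (n * n) 0

-- ===== PORT B =====
-- Source B: return (n*n).bit_length() - 1 ; bit_length of a nonnegative int is Nat.size
def snakefill_alt (n : Int) : Int := ((n * n).toNat.size : Int) - 1

-- ===== PRECONDITION & SPEC =====
def Spec_snakefill (n : Int) (out : Int) : Prop := out = snakefill_alt n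
instance (n : Int) (out : Int) : Decidable (Spec_snakefill n out) := by unfold Spec_snakefill; infer_instance

-- ===== CLAIM (what is proved, stated in full; the proofs are below) =====
def Claim_equal_snakefill : Prop := ∀ (n : Int), Dom_snakefill n → Spec_snakefill n (snakefill n)

-- ===== LEMMAS AND PROOFS =====

-- Invariant: once 2^count ≤ space, the loop returns size(space) - 1
theorem snakefillLoop_eq (space : Int) (count : Nat)
    (h : (2 : Int) ^ count ≤ space) :
    snakefillLoop space count = (space.toNat.size : Int) - 1 := by
  have hs : (0 : Int) ≤ space := le_trans (by positivity) h
  have hcast : ((2 ^ count : Nat) : Int) = (2 : Int) ^ count := by push_cast; ring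
  rw [snakefillLoop]
  split_ifs with h1 h2
  · -- 2^count = space : size (2^count) = count + 1
    have : space.toNat = 2 ^ count := by omega
    rw [this, Nat.size_pow]
    push_cast; ring
  · -- 2^count > space contradicts h
    exact absurd h (not_le.mpr h2)
  · -- recurse
    by_cases hnext : (2 : Int) ^ (count + 1) ≤ space
    · exact snakefillLoop_eq space (count + 1) hnext
    · -- next step: 2^(count+1) > space, and 2^(count+1) ≠ space; loop returns count
      have hlt : (2 : Int) ^ count < space := lt_of_le_of_ne h h1
      have hcast' : ((2 ^ (count + 1) : Nat) : Int) = (2 : Int) ^ (count + 1) := by push_cast; ring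
      have hltN : 2 ^ count < space.toNat := by omega
      have hgtN : space.toNat < 2 ^ (count + 1) := by
        have := not_le.mp hnext; omega
      have hsize : space.toNat.size = count + 1 := by
        have h1' : count < space.toNat.size := Nat.lt_size.mpr (le_of_lt hltN)
        have h2' : space.toNat.size ≤ count + 1 := Nat.size_le.mpr hgtN
        omega
      rw [snakefillLoop]
      split_ifs with ha hb
      · exact absurd ha (ne_of_gt (not_le.mp hnext))
      · simp [hsize]
      · exact absurd (not_le.mp hnext) hb
termination_by space.toNat + 1 - 2 ^ count
decreasing_by
  have : (2 ^ count : Nat) < space.toNat := by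
    have hlt : (2 : Int) ^ count < space := lt_of_le_of_ne h h1
    omega
  have : (2 ^ count : Nat) < 2 ^ (count + 1) := by
    have := Nat.one_le_two_pow (n := count); omega
  omega

-- ===== VERDICT (by name: the statement is the Claim_ definition above) =====
theorem snakefill_spec : Claim_equal_snakefill := by
  intro n _
  unfold Spec_snakefill snakefill snakefill_alt
  have hs : (0 : Int) ≤ n * n := mul_self_nonneg n
  by_cases h : (1 : Int) ≤ n * n
  · have := snakefillLoop_eq (n * n) 0 (by simpa using h)
    simpa using this
  · -- n*n = 0 : loop returns -1 immediately, size 0 = 0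
    have h0 : n * n = 0 := by omega
    rw [snakefillLoop]
    simp [h0, Nat.size_zero]
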